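-- pv_equiv track=rewrite | github.com/MrSeojin/ProblemSolving | ch02_05.py | solution
-- ===== SOURCE A (Python) =====
-- def solution(n, lost, reserve):
--     _lost = [l for l in lost if l not in reserve]
--     _reserve = [r for r in reserve if r not in lost]
--
--     _reserve.sort()
--     for i in _reserve:
--         if i -1 in _lost:
--             _lost.remove(i -1)
--         elif i +1 in _lost:
--             _lost.remove(i +1)
--
--     return n - len(_lost)
-- ===== SOURCE B (Python) =====
-- def solution(n, lost, reserve):
--     _lost = sorted(l for l in lost if l not in reserve)
--     _reserve = sorted(r for r in reserve if r not in lost)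
--     p = q = m = 0
--     while p < len(_lost) and q < len(_reserve):
--         if _reserve[q] < _lost[p] - 1:
--             q += 1
--         elif _reserve[q] > _lost[p] + 1:
--             p += 1
--         else:
--             m += 1
--             p += 1
--             q += 1
--     return n - (len(_lost) - m)
-- ===== Notes on version B (the rewrite author's own statement) =====
-- stated objective: faster
-- what changed: Replaces A's mutable-list greedy (repeated 'in' membership scans and list.remove over _lost for each reserve) with sorting both filtered lists once and a single two-pointer merge scan that counts matches.
import Mathlib
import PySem

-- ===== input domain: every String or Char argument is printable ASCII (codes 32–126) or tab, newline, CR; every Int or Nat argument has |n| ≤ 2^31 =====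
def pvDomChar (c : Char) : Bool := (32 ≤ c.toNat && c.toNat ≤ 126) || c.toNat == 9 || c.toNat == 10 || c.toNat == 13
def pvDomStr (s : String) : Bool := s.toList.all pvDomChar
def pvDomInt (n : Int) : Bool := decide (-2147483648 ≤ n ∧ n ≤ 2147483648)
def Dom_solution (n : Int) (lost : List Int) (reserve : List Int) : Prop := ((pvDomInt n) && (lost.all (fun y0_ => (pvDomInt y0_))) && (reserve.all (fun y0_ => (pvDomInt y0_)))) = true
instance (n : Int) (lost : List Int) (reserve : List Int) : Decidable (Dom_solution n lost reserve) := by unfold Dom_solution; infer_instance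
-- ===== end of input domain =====

-- B replaces A's repeated `in`/`remove` scans over the mutable _lost list with a single
-- two-pointer merge over both sorted filtered lists (objective: faster, O((n+m) log(n+m)) vs O(n·m)).

-- ===== PORT A =====
-- one iteration of A's for-loop body over the mutable _lost list
-- (list.remove is guarded by the membership test, so remove? is always `some` here)
def stepA (L : List Int) (i : Int) : List Int :=
  if L.contains (i - 1) then (PySem.List.remove? L (i - 1)).getD L
  else if L.contains (i + 1) then (PySem.List.remove? L (i + 1)).getD L
  else L

def solution (n : Int) (lost : List Int) (reserve : List Int) : Int :=
  let _lost := lost.filter (fun l => !reserve.contains l)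
  let _reserve := reserve.filter (fun r => !lost.contains r)
  let _reserveS := PySem.List.sorted _reserve (fun x => x) false
  let final := _reserveS.foldl stepA _lost
  n - final.length

-- ===== PORT B =====
-- the two-pointer while loop of Source B, as structural recursion on the two suffixes
def tp : List Int → List Int → Nat
  | [], _ => 0
  | _, [] => 0
  | l :: L, r :: R =>
      if r < l - 1 then tp (l :: L) R
      else if r > l + 1 then tp L (r :: R)
      else tp L R + 1
termination_by a b => a.length + b.length
decreasing_by all_goals (simp; try omega)

def solution_alt (n : Int) (lost : List Int) (reserve : List Int) : Int :=
  let _lost := PySem.List.sorted (lost.filter (fun l => !reserve.contains l)) (fun x => x) false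
  let _reserve := PySem.List.sorted (reserve.filter (fun r => !lost.contains r)) (fun x => x) false
  n - ((_lost.length : Int) - (tp _lost _reserve : Int))

-- ===== PRECONDITION & SPEC =====
def Spec_solution (n : Int) (lost : List Int) (reserve : List Int) (out : Int) : Prop := out = solution_alt n lost reserve
instance (n : Int) (lost : List Int) (reserve : List Int) (out : Int) : Decidable (Spec_solution n lost reserve out) := by unfold Spec_solution; infer_instance

-- ===== CLAIM (what is proved, stated in full; the proofs are below) =====
def Claim_equal_solution : Prop := ∀ (n : Int) (lost : List Int) (reserve : List Int), Dom_solution n lost reserve → Spec_solution n lost reserve (solution n lost reserve)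

-- ===== LEMMAS AND PROOFS =====

-- abstract greedy count of A's loop: matches made processing R against multiset L
def g : List Int → List Int → Nat
  | _, [] => 0
  | L, r :: R =>
      if (r - 1) ∈ L then g (L.erase (r - 1)) R + 1
      else if (r + 1) ∈ L then g (L.erase (r + 1)) R + 1
      else g L R

theorem stepA_eq_erase (L : List Int) (i : Int) :
    stepA L i = if (i - 1) ∈ L then L.erase (i - 1)
      else if (i + 1) ∈ L then L.erase (i + 1) else L := by
  unfold stepA
  by_cases h1 : (i - 1) ∈ L
  · simp [h1, PySem.List.remove?_eq_some_erase _ _ h1]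
  · by_cases h2 : (i + 1) ∈ L
    · simp [h1, h2, PySem.List.remove?_eq_some_erase _ _ h2]
    · simp [h1, h2]

theorem g_cons_pos1 (L : List Int) (r : Int) (R : List Int) (h1 : (r - 1) ∈ L) :
    g L (r :: R) = g (L.erase (r - 1)) R + 1 := by simp [g, h1]

theorem g_cons_pos2 (L : List Int) (r : Int) (R : List Int) (h1 : (r - 1) ∉ L)
    (h2 : (r + 1) ∈ L) : g L (r :: R) = g (L.erase (r + 1)) R + 1 := by simp [g, h1, h2]

theorem g_cons_neg (L : List Int) (r : Int) (R : List Int) (h1 : (r - 1) ∉ L)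
    (h2 : (r + 1) ∉ L) : g L (r :: R) = g L R := by simp [g, h1, h2]

theorem loop_len (R : List Int) : ∀ L : List Int,
    (R.foldl stepA L).length + g L R = L.length := by
  induction R with
  | nil => intro L; simp [g]
  | cons r R ih =>
    intro L
    rw [List.foldl_cons, stepA_eq_erase]
    by_cases h1 : (r - 1) ∈ L
    · rw [if_pos h1, g_cons_pos1 L r R h1]
      have h := ih (L.erase (r - 1))
      have hlen := List.length_erase_of_mem h1
      have hpos : 0 < L.length := List.length_pos_of_mem h1
      omega
    · by_cases h2 : (r + 1) ∈ L
      · rw [if_neg h1, if_pos h2, g_cons_pos2 L r R h1 h2]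
        have h := ih (L.erase (r + 1))
        have hlen := List.length_erase_of_mem h2
        have hpos : 0 < L.length := List.length_pos_of_mem h2
        omega
      · rw [if_neg h1, if_neg h2, g_cons_neg L r R h1 h2]
        exact ih L

theorem g_perm (R : List Int) : ∀ L L' : List Int, L.Perm L' → g L R = g L' R := by
  induction R with
  | nil => intro L L' _; simp [g]
  | cons r R ih =>
    intro L L' hp
    simp only [g, hp.mem_iff]
    by_cases h1 : (r - 1) ∈ L'
    · simp [h1, ih _ _ (hp.erase (r - 1))]
    · by_cases h2 : (r + 1) ∈ L'
      · simp [h1, h2, ih _ _ (hp.erase (r + 1))]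
      · simp [h1, h2, ih _ _ hp]

-- a lost element strictly below every reserve−1 can never be matched
theorem g_nil : ∀ R : List Int, g [] R = 0
  | [] => by simp [g]
  | r :: R => by simp [g, g_nil R]

theorem g_skip (R : List Int) : ∀ (l : Int) (L : List Int),
    (∀ r ∈ R, l + 1 < r) → g (l :: L) R = g L R := by
  induction R with
  | nil => intro l L _; simp [g]
  | cons r R ih =>
    intro l L hall
    have hr : l + 1 < r := hall r (by simp)
    have hne1 : r - 1 ≠ l := by omega
    have hne2 : r + 1 ≠ l := by omega
    have hb1 : ((l : Int) == (r - 1)) = false := by simpa using Ne.symm hne1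
    have hb2 : ((l : Int) == (r + 1)) = false := by simpa using Ne.symm hne2
    have e1 : (l :: L).erase (r - 1) = l :: L.erase (r - 1) := List.erase_cons_tail (by simp [hb1])
    have e2 : (l :: L).erase (r + 1) = l :: L.erase (r + 1) := List.erase_cons_tail (by simp [hb2])
    have hrest : ∀ r' ∈ R, l + 1 < r' := fun r' h => hall r' (by simp [h])
    by_cases h1 : (r - 1) ∈ L
    · have hmem : (r - 1) ∈ l :: L := by simp [h1]
      rw [g_cons_pos1 _ r R hmem, g_cons_pos1 _ r R h1, e1, ih l (L.erase (r - 1)) hrest]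
    · have hn1 : (r - 1) ∉ l :: L := by simp [h1, hne1]
      by_cases h2 : (r + 1) ∈ L
      · have hmem : (r + 1) ∈ l :: L := by simp [h2]
        rw [g_cons_pos2 _ r R hn1 hmem, g_cons_pos2 _ r R h1 h2, e2,
          ih l (L.erase (r + 1)) hrest]
      · have hn2 : (r + 1) ∉ l :: L := by simp [h2, hne2]
        rw [g_cons_neg _ r R hn1 hn2, g_cons_neg _ r R h1 h2, ih l L hrest]

theorem tp_eq_g : ∀ (L R : List Int),
    L.Pairwise (· ≤ ·) → R.Pairwise (· ≤ ·) → (∀ x ∈ L, x ∉ R) →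
    tp L R = g L R := by
  intro L R
  induction L, R using tp.induct with
  | case1 R => intro _ _ _; simp [tp, g_nil]
  | case2 L h =>
    intro _ _ _
    cases L with
    | nil => exact absurd rfl h
    | cons l L => simp [tp, g]
  | case3 l L r R hlt ih =>
    intro hL hR hdis
    have hgeL : ∀ x ∈ l :: L, l ≤ x := by
      intro x hx
      rcases List.mem_cons.mp hx with h | h
      · exact le_of_eq h.symm
      · exact (List.pairwise_cons.mp hL).1 x h
    have h1 : (r - 1) ∉ l :: L := fun h => by have := hgeL _ h; omega
    have h2 : (r + 1) ∉ l :: L := fun h => by have := hgeL _ h; omega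
    rw [tp, if_pos hlt, g_cons_neg _ r R h1 h2]
    exact ih hL (List.pairwise_cons.mp hR).2 (fun x hx hm => hdis x hx (by simp [hm]))
  | case4 l L r R hlt hgt ih =>
    intro hL hR hdis
    have hskip : ∀ r' ∈ r :: R, l + 1 < r' := by
      intro r' h
      rcases List.mem_cons.mp h with h | h
      · omega
      · have := (List.pairwise_cons.mp hR).1 r' h; omega
    rw [tp, if_neg hlt, if_pos hgt, g_skip _ l L hskip]
    exact ih (List.pairwise_cons.mp hL).2 hR (fun x hx => hdis x (by simp [hx]))
  | case5 l L r R hlt hgt ih =>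
    intro hL hR hdis
    have hne : r ≠ l := fun h => hdis l (by simp) (by simp [h])
    have hgeL : ∀ x ∈ l :: L, l ≤ x := by
      intro x hx
      rcases List.mem_cons.mp hx with h | h
      · exact le_of_eq h.symm
      · exact (List.pairwise_cons.mp hL).1 x h
    have hrec := ih (List.pairwise_cons.mp hL).2 (List.pairwise_cons.mp hR).2
      (fun x hx hm => hdis x (by simp [hx]) (by simp [hm]))
    rcases (by omega : r = l - 1 ∨ r = l + 1) with h | h
    · -- r = l - 1 : r - 1 = l - 2 is below every lost element; r + 1 = l matches the head
      have hnot : (r - 1) ∉ l :: L := fun hm => by have := hgeL _ hm; omega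
      have hl : r + 1 = l := by omega
      have hmem : (r + 1) ∈ l :: L := by simp [hl]
      have herase : (l :: L).erase (r + 1) = L := by simp [hl]
      rw [tp, if_neg hlt, if_neg hgt, g_cons_pos2 _ r R hnot hmem, herase, hrec]
    · -- r = l + 1 : r - 1 = l matches the head
      have hl : r - 1 = l := by omega
      have hmem : (r - 1) ∈ l :: L := by simp [hl]
      have herase : (l :: L).erase (r - 1) = L := by simp [hl]
      rw [tp, if_neg hlt, if_neg hgt, g_cons_pos1 _ r R hmem, herase, hrec]

-- ===== VERDICT (by name: the statement is the Claim_ definition above) =====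
theorem solution_spec : Claim_equal_solution := by
  intro n lost reserve _
  simp only [Spec_solution, solution, solution_alt]
  set Lf := lost.filter (fun l => !reserve.contains l) with hLf
  set Rf := reserve.filter (fun r => !lost.contains r) with hRf
  set Ls := PySem.List.sorted Lf (fun x => x) false with hLs
  set Rs := PySem.List.sorted Rf (fun x => x) false with hRs
  have hperm : Ls.Perm Lf := PySem.List.sorted_perm ..
  have hlen : Ls.length = Lf.length := hperm.length_eq
  have hloop := loop_len Rs Lf
  have hg : g Lf Rs = g Ls Rs := g_perm Rs Lf Ls hperm.symm
  have hLsorted : Ls.Pairwise (· ≤ ·) := by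
    have := PySem.List.sorted_pairwise (xs := Lf) (key := fun x => x)
    simpa [hLs] using this
  have hRsorted : Rs.Pairwise (· ≤ ·) := by
    have := PySem.List.sorted_pairwise (xs := Rf) (key := fun x => x)
    simpa [hRs] using this
  have hdis : ∀ x ∈ Ls, x ∉ Rs := by
    intro x hx hxR
    have hx' : x ∈ Lf := hperm.mem_iff.mp hx
    have hxR' : x ∈ Rf := (PySem.List.sorted_perm ..).mem_iff.mp hxR
    simp only [hLf, List.mem_filter] at hx'
    simp only [hRf, List.mem_filter] at hxR'
    have h1 : x ∉ reserve := by simpa using hx'.2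
    exact h1 hxR'.1
  have htp : tp Ls Rs = g Ls Rs := tp_eq_g Ls Rs hLsorted hRsorted hdis
  rw [htp, ← hg] at *
  omega
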